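-- pv_equiv track=rewrite | github.com/nbalepur/expository-text-generation | model/IRP.py | format_out
-- ===== SOURCE A (Python) =====
-- def format_out(all_sentences):
--     ret = ""
--     prev = '\n\n'
--     for sent in all_sentences:
--         sent_form = sent[0].upper() + sent[1:]
--         ret += sent_form if (sent == '\n\n' or prev == '\n\n') else f' {sent_form}'
--         prev = sent
--     return ret
-- ===== SOURCE B (Python) =====
-- def format_out(all_sentences):
--     def cap(s):
--         return s[0].upper() + s[1:]
--     groups = []
--     cur = []
--     for sent in all_sentences:
--         if sent == '\n\n':
--             groups.append(cur)
--             cur = []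
--         else:
--             cur.append(sent)
--     groups.append(cur)
--     return '\n\n'.join(' '.join(cap(s) for s in g) for g in groups)
-- ===== Notes on version B (the rewrite author's own statement) =====
-- stated objective: idiomatic
-- what changed: B replaces A's running (ret, prev) accumulator loop with a split-into-paragraph-groups pass followed by ' '.join within groups and '\n\n'.join across groups.
import Mathlib
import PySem

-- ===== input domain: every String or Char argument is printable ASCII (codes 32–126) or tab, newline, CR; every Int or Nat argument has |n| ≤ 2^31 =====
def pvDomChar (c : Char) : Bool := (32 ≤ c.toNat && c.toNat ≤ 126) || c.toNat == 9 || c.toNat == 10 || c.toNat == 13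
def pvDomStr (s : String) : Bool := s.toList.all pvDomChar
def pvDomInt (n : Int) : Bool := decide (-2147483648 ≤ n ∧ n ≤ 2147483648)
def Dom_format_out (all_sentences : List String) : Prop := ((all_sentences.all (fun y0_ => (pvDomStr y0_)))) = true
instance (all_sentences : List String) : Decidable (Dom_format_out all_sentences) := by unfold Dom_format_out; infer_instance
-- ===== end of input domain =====

-- B replaces A's running (ret, prev) accumulator loop by splitting the input into
-- paragraph groups at '\n\n' tokens and joining capitalized sentences with ' ' and groups with '\n\n'.


-- ===== PORT A =====
-- shared helper: Python's `s[0].upper() + s[1:]` (both A and B contain this very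
-- expression); on s = "" Python raises IndexError (excluded by Pre_), here s is returned.
def capFirst (s : List Char) : List Char :=
  match PySem.List.pyGet? s 0 with
  | some c => PySem.Chars.upper [c] ++ PySem.List.slice s (some 1) none
  | none => s

-- A's loop state: (ret, prev); strings handled as code-point lists (PySem convention).
def format_out (all_sentences : List String) : String :=
  String.ofList (((all_sentences.map String.toList).foldl
    (fun (st : List Char × List Char) sent =>
      let sent_form := capFirst sent
      (st.1 ++ (if sent = ['\n', '\n'] ∨ st.2 = ['\n', '\n'] then sent_form else ' ' :: sent_form),
       sent))
    ([], ['\n', '\n'])).1)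

-- ===== PORT B =====
-- B: split into groups at '\n\n', then '\n\n'.join(' '.join(cap(s) for s in g) for g in groups).
def format_out_alt (all_sentences : List String) : String :=
  let p := (all_sentences.map String.toList).foldl
    (fun (st : List (List (List Char)) × List (List Char)) sent =>
      if sent = ['\n', '\n'] then (st.1 ++ [st.2], []) else (st.1, st.2 ++ [sent]))
    ([], [])
  let groups := p.1 ++ [p.2]
  String.ofList (PySem.Chars.join ['\n', '\n']
    (groups.map (fun g => PySem.Chars.join [' '] (g.map capFirst))))

-- ===== PRECONDITION & SPEC =====
-- Pre_ excludes lists containing an empty-string element, on which Python A (and B)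
-- raise IndexError at s[0].
def Pre_format_out (all_sentences : List String) : Prop :=
  ∀ s ∈ all_sentences, s ≠ ""
instance (all_sentences : List String) : Decidable (Pre_format_out all_sentences) := by
  unfold Pre_format_out; infer_instance
def pvWitness_format_out : List String := ["hello there.", "\n\n", "new paragraph.", "more text."]

def Spec_format_out (all_sentences : List String) (out : String) : Prop := out = format_out_alt all_sentences
instance (all_sentences : List String) (out : String) : Decidable (Spec_format_out all_sentences out) := by unfold Spec_format_out; infer_instance

-- ===== CLAIM (what is proved, stated in full; the proofs are below) =====
def Claim_equal_format_out : Prop := ∀ (all_sentences : List String), Dom_format_out all_sentences → Pre_format_out all_sentences → Spec_format_out all_sentences (format_out all_sentences)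

-- ===== LEMMAS AND PROOFS =====

-- common specification of the emitted text, parameterised by "previous token was '\n\n'"
def pvSpecRun : List (List Char) → Bool → List Char
  | [], _ => []
  | s :: t, f =>
      (if s = ['\n', '\n'] ∨ f = true then capFirst s else ' ' :: capFirst s) ++
      pvSpecRun t (decide (s = ['\n', '\n']))

-- per-group rendering used by B
def pvJoinGroup (g : List (List Char)) : List Char :=
  PySem.Chars.join [' '] (g.map capFirst)
def pvJoinAll (gs : List (List (List Char))) : List Char :=
  PySem.Chars.join ['\n', '\n'] (gs.map pvJoinGroup)

theorem pvJoin_snoc_cons {sep : List Char} (t : List (List Char)) (b x : List Char) :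
    PySem.Chars.join sep ((b :: t) ++ [x]) = PySem.Chars.join sep (b :: t) ++ sep ++ x := by
  induction t generalizing b with
  | nil => simp [PySem.Chars.join_cons_cons, PySem.Chars.join_singleton]
  | cons c t' ih =>
    have h1 : (b :: c :: t') ++ [x] = b :: c :: (t' ++ [x]) := by simp
    rw [h1, PySem.Chars.join_cons_cons]
    have h2 : c :: (t' ++ [x]) = (c :: t') ++ [x] := by simp
    rw [h2, ih c, PySem.Chars.join_cons_cons]
    simp [List.append_assoc]

theorem pvJoin_snoc {sep : List Char} (l : List (List Char)) (x : List Char) (h : l ≠ []) :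
    PySem.Chars.join sep (l ++ [x]) = PySem.Chars.join sep l ++ sep ++ x := by
  cases l with
  | nil => exact absurd rfl h
  | cons b t => exact pvJoin_snoc_cons t b x

theorem pvJoinGroup_snoc (g : List (List Char)) (s : List Char) :
    pvJoinGroup (g ++ [s]) =
      pvJoinGroup g ++ (if g = [] then capFirst s else ' ' :: capFirst s) := by
  cases g with
  | nil => simp [pvJoinGroup, PySem.Chars.join_singleton, PySem.Chars.join_nil]
  | cons a t =>
    unfold pvJoinGroup
    rw [List.map_append, show List.map capFirst [s] = [capFirst s] from rfl,
      pvJoin_snoc _ _ (by simp), if_neg (by simp)]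
    simp [List.append_assoc]

theorem pvJoinAll_snoc (gs : List (List (List Char))) (g : List (List Char)) (h : gs ≠ []) :
    pvJoinAll (gs ++ [g]) = pvJoinAll gs ++ ['\n', '\n'] ++ pvJoinGroup g := by
  unfold pvJoinAll
  rw [List.map_append, show List.map pvJoinGroup [g] = [pvJoinGroup g] from rfl]
  exact pvJoin_snoc _ _ (by simpa using h)

theorem pvJoinAll_snoc_nil (gs : List (List (List Char))) (g : List (List Char)) :
    pvJoinAll (gs ++ [g] ++ [[]]) = pvJoinAll (gs ++ [g]) ++ ['\n', '\n'] := by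
  rw [pvJoinAll_snoc _ _ (by simp)]
  simp [pvJoinGroup, PySem.Chars.join_nil]

theorem pvJoinAll_last_ext (gs : List (List (List Char))) (cur : List (List Char)) (s : List Char) :
    pvJoinAll (gs ++ [cur ++ [s]]) =
      pvJoinAll (gs ++ [cur]) ++ (if cur = [] then capFirst s else ' ' :: capFirst s) := by
  cases gs with
  | nil =>
    simp only [List.nil_append, pvJoinAll]
    rw [show List.map pvJoinGroup [cur ++ [s]] = [pvJoinGroup (cur ++ [s])] from rfl,
      show List.map pvJoinGroup [cur] = [pvJoinGroup cur] from rfl,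
      PySem.Chars.join_singleton, PySem.Chars.join_singleton]
    exact pvJoinGroup_snoc cur s
  | cons a t =>
    rw [pvJoinAll_snoc _ _ (by simp), pvJoinAll_snoc _ _ (by simp), pvJoinGroup_snoc]
    simp [List.append_assoc]

-- A's fold computes pvSpecRun
theorem pvFoldA (xs : List (List Char)) (acc prev : List Char) :
    (xs.foldl
      (fun (st : List Char × List Char) sent =>
        (st.1 ++ (if sent = ['\n', '\n'] ∨ st.2 = ['\n', '\n'] then capFirst sent else ' ' :: capFirst sent),
         sent))
      (acc, prev)).1 = acc ++ pvSpecRun xs (decide (prev = ['\n', '\n'])) := by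
  induction xs generalizing acc prev with
  | nil => simp [pvSpecRun]
  | cons s t ih =>
    simp only [List.foldl_cons, pvSpecRun]
    rw [ih]
    by_cases hs : s = ['\n', '\n'] <;> by_cases hp : prev = ['\n', '\n'] <;>
      simp [hs, hp, List.append_assoc]

-- B's fold computes pvSpecRun, with cur = [] tracking "previous was '\n\n'"
theorem pvFoldB (xs : List (List Char)) (gs : List (List (List Char))) (cur : List (List Char)) :
    pvJoinAll ((xs.foldl
        (fun (st : List (List (List Char)) × List (List Char)) sent =>
          if sent = ['\n', '\n'] then (st.1 ++ [st.2], []) else (st.1, st.2 ++ [sent]))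
        (gs, cur)).1 ++ [(xs.foldl
        (fun (st : List (List (List Char)) × List (List Char)) sent =>
          if sent = ['\n', '\n'] then (st.1 ++ [st.2], []) else (st.1, st.2 ++ [sent]))
        (gs, cur)).2]) =
      pvJoinAll (gs ++ [cur]) ++ pvSpecRun xs cur.isEmpty := by
  induction xs generalizing gs cur with
  | nil => simp [pvSpecRun]
  | cons s t ih =>
    simp only [List.foldl_cons]
    by_cases hs : s = ['\n', '\n']
    · rw [if_pos hs, ih, pvJoinAll_snoc_nil gs cur]
      simp only [pvSpecRun]
      rw [if_pos (Or.inl hs), hs]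
      rw [show capFirst ['\n', '\n'] = ['\n', '\n'] from by decide]
      simp [List.append_assoc]
    · rw [if_neg hs, ih, pvJoinAll_last_ext gs cur s]
      simp only [pvSpecRun]
      cases cur with
      | nil => simp [hs, List.append_assoc]
      | cons a b => simp [hs, List.append_assoc]

-- ===== VERDICT (by name: the statement is the Claim_ definition above) =====
theorem format_out_spec : Claim_equal_format_out := by
  intro xs _ _
  unfold Spec_format_out
  simp only [format_out, format_out_alt]
  rw [pvFoldA]
  rw [show (fun g => PySem.Chars.join [' '] (List.map capFirst g)) = pvJoinGroup from rfl]
  have hall : ∀ gs : List (List (List Char)),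
      PySem.Chars.join ['\n', '\n'] (List.map pvJoinGroup gs) = pvJoinAll gs := fun _ => rfl
  rw [hall, pvFoldB (xs.map String.toList) [] []]
  rw [show pvJoinAll (([] : List (List (List Char))) ++ [[]]) = [] from by
    simp [pvJoinAll, pvJoinGroup, PySem.Chars.join_singleton, PySem.Chars.join_nil]]
  simp
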